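-- pv_equiv track=rewrite | github.com/xiaozhang112/Sage | sagents/agent/agent_base.py | _judge_delta_content_type
-- ===== SOURCE A (Python) =====
-- from typing import List, Dict, Any, Optional, Union, AsyncGenerator, cast
--
-- def _judge_delta_content_type(
--                               delta_content: str,
--                               all_tokens_str: str,
--                               tag_type: Optional[List[str]] = None) -> str:
--     if tag_type is None:
--         tag_type = []
--
--     start_tag = [f"<{tag}>" for tag in tag_type]
--     end_tag = [f"</{tag}>" for tag in tag_type]
--
--     # 构造结束标签的所有可能前缀
--     end_tag_process_list = []
--     for tag in end_tag:
--         for i in range(len(tag)):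
--             end_tag_process_list.append(tag[:i + 1])
--
--     last_tag = None
--     last_tag_index: Optional[int] = None
--
--     all_tokens_str = (all_tokens_str + delta_content).strip()
--
--     # 查找最后出现的标签
--     for tag in start_tag + end_tag:
--         index = all_tokens_str.rfind(tag)
--         if index != -1:
--             if last_tag_index is None or index > last_tag_index:
--                 last_tag = tag
--                 last_tag_index = index
--
--     if last_tag is None:
--         return "tag"
--
--     # Ensure last_tag_index is not None for mypy
--     if last_tag_index is None:
--         return "tag"
--
--     if last_tag in start_tag:
--         if last_tag_index + len(last_tag) == len(all_tokens_str):
--             return 'tag'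
--         for end_tag_process in end_tag_process_list:
--             if all_tokens_str.endswith(end_tag_process):
--                 return 'unknown'
--         else:
--             return last_tag.replace("<", "").replace(">", "")
--     elif last_tag in end_tag:
--         return 'tag'
--
--     return "tag"
-- ===== SOURCE B (Python) =====
-- from typing import List, Optional
--
--
-- def _judge_delta_content_type(delta_content: str,
--                               all_tokens_str: str,
--                               tag_type: Optional[List[str]] = None) -> str:
--     names = tag_type if tag_type is not None else []
--     start_tag = ["<" + n + ">" for n in names]
--     end_tag = ["</" + n + ">" for n in names]
--     tags = start_tag + end_tag
--     s = (all_tokens_str + delta_content).strip()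
--     if not tags:               # no tag types: nothing can ever be found
--         return "tag"
--
--     # one backward scan over positions: the first position (from the end) where
--     # some tag starts is the last tag occurrence; first tag in list order wins there
--     for i in range(len(s) - 1, -1, -1):
--         if s[i] != "<":        # every tag starts with "<": skip other positions fast
--             continue
--         for tag in tags:
--             if s.startswith(tag, i):
--                 if tag in start_tag:
--                     if i + len(tag) == len(s):
--                         return "tag"
--                     if any(s.endswith(e[:k + 1]) for e in end_tag for k in range(len(e))):
--                         return "unknown"
--                     return tag.replace("<", "").replace(">", "")
--                 return "tag"
--     return "tag"
-- ===== Notes on version B (the rewrite author's own statement) =====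
-- stated objective: alternative
-- what changed: Replaces the per-tag rfind loop (one full rfind scan per tag, then an argmax fold with tie-breaking) by a single backward scan over positions of the combined string that stops at the first position where any tag starts, which is exactly the last tag occurrence; classification then happens inline with early returns instead of a separate flattened prefix list.
import Mathlib
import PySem

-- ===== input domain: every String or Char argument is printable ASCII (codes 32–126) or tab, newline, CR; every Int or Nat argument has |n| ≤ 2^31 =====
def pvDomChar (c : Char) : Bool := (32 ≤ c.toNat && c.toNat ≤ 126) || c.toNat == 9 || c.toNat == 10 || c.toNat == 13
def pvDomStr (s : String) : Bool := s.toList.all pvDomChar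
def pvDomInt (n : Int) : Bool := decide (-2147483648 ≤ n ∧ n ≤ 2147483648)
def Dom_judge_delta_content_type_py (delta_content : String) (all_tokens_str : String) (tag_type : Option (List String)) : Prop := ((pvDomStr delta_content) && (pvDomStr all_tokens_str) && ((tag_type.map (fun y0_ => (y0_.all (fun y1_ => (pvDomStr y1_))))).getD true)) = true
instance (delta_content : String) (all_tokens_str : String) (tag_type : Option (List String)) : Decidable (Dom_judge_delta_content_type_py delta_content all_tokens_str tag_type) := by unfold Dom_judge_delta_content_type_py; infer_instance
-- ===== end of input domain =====

-- B replaces A's per-tag rfind loop + argmax fold by ONE backward scan over positions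
-- that stops at the first position (from the end) where any tag starts: alternative algorithm.

-- ===== PORT A =====
-- the body of A's 'for tag in start_tag + end_tag' loop (kept as a named helper)
def pvStepA (s : String) (st : Option String × Option Int) (tag : String) : Option String × Option Int :=
  let index := PySem.Str.rfind s tag
  if index ≠ -1 then
    match st.2 with
    | none => (some tag, some index)
    | some li => if index > li then (some tag, some index) else st
  else st

def judge_delta_content_type_py (delta_content : String) (all_tokens_str : String) (tag_type : Option (List String)) : String :=
  let tagType := tag_type.getD []                               -- if tag_type is None: tag_type = []
  let start_tag := tagType.map (fun tag => "<" ++ tag ++ ">")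
  let end_tag := tagType.map (fun tag => "</" ++ tag ++ ">")
  -- end_tag_process_list: all non-empty prefixes of each end tag, appended in loop order
  let end_tag_process_list := end_tag.foldl (fun acc tag =>
      (List.range tag.toList.length).foldl                      -- range(len(tag))
        (fun acc2 i => acc2 ++ [PySem.Str.slice tag none (some ((i : Int) + 1))]) acc) ([] : List String)
  let s := PySem.Str.strip (all_tokens_str ++ delta_content)    -- (all_tokens_str + delta_content).strip()
  let st := (start_tag ++ end_tag).foldl (pvStepA s) (none, none)
  match st with
  | (none, _) => "tag"
  | (_, none) => "tag"
  | (some last_tag, some last_tag_index) =>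
    if last_tag ∈ start_tag then
      if last_tag_index + PySem.Str.len last_tag = PySem.Str.len s then "tag"
      else if end_tag_process_list.any (fun p => PySem.Str.endswith s p) then "unknown"
      else PySem.Str.replace (PySem.Str.replace last_tag "<" "") ">" ""
    else if last_tag ∈ end_tag then "tag"
    else "tag"

-- ===== PORT B =====
-- backward scan: positions i = n-1, n-2, …, 0; positions with s[i] ≠ '<' are skipped
-- (every tag starts with "<"); first tag (in list order) starting at i wins.
-- s.startswith(tag, i) is ported as tag.toList.isPrefixOf (s.toList.drop i) — exact for 0 ≤ i;
-- s[i] is ported as PySem.Str.pyGet? s i — exact for this in-range i.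
def pvScanB (s : String) (tags : List String) : Nat → Option (String × Nat)
  | 0 => none
  | i + 1 =>
    if PySem.Str.pyGet? s (i : Int) ≠ some '<' then pvScanB s tags i
    else
      match tags.find? (fun t => t.toList.isPrefixOf (s.toList.drop i)) with
      | some t => some (t, i)
      | none => pvScanB s tags i

def judge_delta_content_type_py_alt (delta_content : String) (all_tokens_str : String) (tag_type : Option (List String)) : String :=
  let names := tag_type.getD []
  let start_tag := names.map (fun n => "<" ++ n ++ ">")
  let end_tag := names.map (fun n => "</" ++ n ++ ">")
  let tags := start_tag ++ end_tag
  let s := PySem.Str.strip (all_tokens_str ++ delta_content)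
  if tags.isEmpty then "tag"              -- if not tags: return "tag"
  else match pvScanB s tags s.toList.length with
  | none => "tag"
  | some (tag, i) =>
    if tag ∈ start_tag then
      if i + tag.toList.length = s.toList.length then "tag"
      else if end_tag.any (fun e =>
          (List.range e.toList.length).any (fun k => PySem.Str.endswith s (PySem.Str.slice e none (some ((k : Int) + 1))))) then "unknown"
      else PySem.Str.replace (PySem.Str.replace tag "<" "") ">" ""
    else "tag"

-- ===== PRECONDITION & SPEC =====
def Spec_judge_delta_content_type_py (delta_content : String) (all_tokens_str : String) (tag_type : Option (List String)) (out : String) : Prop := out = judge_delta_content_type_py_alt delta_content all_tokens_str tag_type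
instance (delta_content : String) (all_tokens_str : String) (tag_type : Option (List String)) (out : String) : Decidable (Spec_judge_delta_content_type_py delta_content all_tokens_str tag_type out) := by unfold Spec_judge_delta_content_type_py; infer_instance

-- ===== CLAIM (what is proved, stated in full; the proofs are below) =====
def Claim_equal_judge_delta_content_type_py : Prop := ∀ (delta_content : String) (all_tokens_str : String) (tag_type : Option (List String)), Dom_judge_delta_content_type_py delta_content all_tokens_str tag_type → Spec_judge_delta_content_type_py delta_content all_tokens_str tag_type (judge_delta_content_type_py delta_content all_tokens_str tag_type)

-- ===== LEMMAS AND PROOFS =====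

-- rfind.go checks positions k, k-1, …, 0 and returns the highest match (or -1)
lemma pv_go_spec (s sub : List Char) (k : Nat) :
    (PySem.Chars.rfind.go s sub k = -1 ∧ ∀ i ≤ k, ¬ sub.isPrefixOf (s.drop i) = true) ∨
    (∃ i : Nat, i ≤ k ∧ PySem.Chars.rfind.go s sub k = (i : Int) ∧ sub.isPrefixOf (s.drop i) = true ∧
      ∀ j, i < j → j ≤ k → ¬ sub.isPrefixOf (s.drop j) = true) := by
  induction k with
  | zero =>
    by_cases h : sub.isPrefixOf s = true
    · right; exact ⟨0, le_refl _, by simp [PySem.Chars.rfind.go, h], by simpa using h, by omega⟩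
    · left
      refine ⟨by simp [PySem.Chars.rfind.go, h], ?_⟩
      intro i hi; interval_cases i; simpa using h
  | succ k ih =>
    by_cases h : sub.isPrefixOf (s.drop (k + 1)) = true
    · right
      exact ⟨k + 1, le_refl _, by simp [PySem.Chars.rfind.go, h], h, by omega⟩
    · have hgo : PySem.Chars.rfind.go s sub (k + 1) = PySem.Chars.rfind.go s sub k := by
        simp [PySem.Chars.rfind.go, h]
      rcases ih with ⟨h1, h2⟩ | ⟨i, hik, hi, hpre, hmax⟩
      · left
        refine ⟨by rw [hgo]; exact h1, ?_⟩
        intro i hi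
        rcases Nat.lt_or_ge i (k + 1) with hlt | hge
        · exact h2 i (by omega)
        · have : i = k + 1 := by omega
          subst this; exact h
      · right
        refine ⟨i, by omega, by rw [hgo]; exact hi, hpre, ?_⟩
        intro j hj hj'
        rcases Nat.lt_or_ge j (k + 1) with hlt | hge
        · exact hmax j hj (by omega)
        · have : j = k + 1 := by omega
          subst this; exact h

lemma pv_rfind_cases (s sub : List Char) :
    (PySem.Chars.rfind s sub = -1 ∧ ∀ i ≤ s.length, ¬ sub.isPrefixOf (s.drop i) = true) ∨
    (∃ i : Nat, i ≤ s.length ∧ PySem.Chars.rfind s sub = (i : Int) ∧ sub.isPrefixOf (s.drop i) = true ∧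
      ∀ j, i < j → j ≤ s.length → ¬ sub.isPrefixOf (s.drop j) = true) := by
  simpa [PySem.Chars.rfind] using pv_go_spec s sub s.length

-- rfind = -1 on ROPE iff no match at any position
lemma pv_rfind_neg_iff (s sub : List Char) :
    PySem.Chars.rfind s sub = -1 ↔ ∀ i ≤ s.length, ¬ sub.isPrefixOf (s.drop i) = true := by
  rcases pv_rfind_cases s sub with ⟨h1, h2⟩ | ⟨i, hik, hi, hpre, _⟩
  · exact ⟨fun _ => h2, fun _ => h1⟩
  · constructor
    · intro h; rw [hi] at h; omega
    · intro h; exact absurd hpre (h i hik)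

-- if a match exists at position p, rfind is at least p
lemma pv_rfind_ge (s sub : List Char) (p : Nat) (hp : p ≤ s.length)
    (hpre : sub.isPrefixOf (s.drop p) = true) : (p : Int) ≤ PySem.Chars.rfind s sub := by
  rcases pv_rfind_cases s sub with ⟨_, h2⟩ | ⟨i, hik, hi, _, hmax⟩
  · exact absurd hpre (h2 p hp)
  · rw [hi]
    by_contra hc
    exact absurd hpre (hmax p (by omega) hp)

-- controlled unfoldings of A's loop body
lemma pvStepA_of_neg (s tag : String) (st : Option String × Option Int)
    (hr : PySem.Str.rfind s tag = -1) : pvStepA s st tag = st := by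
  simp only [pvStepA, hr]
  simp

lemma pvStepA_of_pos_none (s tag : String) (o : Option String)
    (hr : ¬ PySem.Str.rfind s tag = -1) :
    pvStepA s (o, none) tag = (some tag, some (PySem.Str.rfind s tag)) := by
  simp only [pvStepA]
  rw [if_pos hr]

lemma pvStepA_of_pos_some (s tag : String) (o : Option String) (i0 : Int)
    (hr : ¬ PySem.Str.rfind s tag = -1) :
    pvStepA s (o, some i0) tag =
      if PySem.Str.rfind s tag > i0 then (some tag, some (PySem.Str.rfind s tag)) else (o, some i0) := by
  simp only [pvStepA]
  rw [if_pos hr]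

-- the recursive right-fold form of A's argmax loop
def pvBest (s : String) : List String → Option (String × Int)
  | [] => none
  | t :: ts =>
    let r := PySem.Str.rfind s t
    match pvBest s ts with
    | none => if r = -1 then none else some (t, r)
    | some (u, j) => if r = -1 then some (u, j) else if j > r then some (u, j) else some (t, r)

lemma pvBest_cons (s t : String) (ts : List String) :
    pvBest s (t :: ts) =
      match pvBest s ts with
      | none => if PySem.Str.rfind s t = -1 then none else some (t, PySem.Str.rfind s t)
      | some (u, j) => if PySem.Str.rfind s t = -1 then some (u, j)
          else if j > PySem.Str.rfind s t then some (u, j) else some (t, PySem.Str.rfind s t) := rfl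

lemma pv_foldl_acc (s : String) (ts : List String) : ∀ (t0 : String) (i0 : Int),
    ts.foldl (pvStepA s) (some t0, some i0) =
      match pvBest s ts with
      | none => (some t0, some i0)
      | some (u, j) => if j > i0 then (some u, some j) else (some t0, some i0) := by
  induction ts with
  | nil => intro t0 i0; rfl
  | cons t ts ih =>
    intro t0 i0
    rw [List.foldl_cons, pvBest_cons]
    by_cases hr : PySem.Str.rfind s t = -1
    · rw [pvStepA_of_neg s t _ hr, ih t0 i0]
      rcases pvBest s ts with _ | ⟨u, j⟩ <;> (try dsimp only) <;>
        rw [if_pos hr] <;> (try dsimp only)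
    · rw [pvStepA_of_pos_some s t _ i0 hr]
      by_cases hgt : PySem.Str.rfind s t > i0
      · rw [if_pos hgt, ih t (PySem.Str.rfind s t)]
        rcases pvBest s ts with _ | ⟨u, j⟩ <;> (try dsimp only)
        · rw [if_neg hr]; (try dsimp only); rw [if_pos hgt]
        · rw [if_neg hr]
          by_cases hj : j > PySem.Str.rfind s t
          · rw [if_pos hj, if_pos hj]; (try dsimp only)
            rw [if_pos (by omega : j > i0)]
          · rw [if_neg hj, if_neg hj]; (try dsimp only); rw [if_pos hgt]
      · rw [if_neg hgt, ih t0 i0]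
        rcases pvBest s ts with _ | ⟨u, j⟩ <;> (try dsimp only)
        · rw [if_neg hr]; (try dsimp only); rw [if_neg hgt]
        · rw [if_neg hr]
          by_cases hj : j > PySem.Str.rfind s t
          · rw [if_pos hj]; (try dsimp only)
          · rw [if_neg hj]; (try dsimp only)
            rw [if_neg (by omega : ¬ j > i0), if_neg hgt]

lemma pv_foldl_eq_best (s : String) (ts : List String) :
    ts.foldl (pvStepA s) (none, none) =
      match pvBest s ts with
      | none => (none, none)
      | some (u, j) => (some u, some j) := by
  induction ts with
  | nil => rfl
  | cons t ts ih =>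
    rw [List.foldl_cons, pvBest_cons]
    by_cases hr : PySem.Str.rfind s t = -1
    · rw [pvStepA_of_neg s t _ hr, ih]
      rcases pvBest s ts with _ | ⟨u, j⟩ <;> (try dsimp only) <;>
        rw [if_pos hr] <;> (try dsimp only)
    · rw [pvStepA_of_pos_none s t _ hr, pv_foldl_acc s ts t (PySem.Str.rfind s t)]
      rcases pvBest s ts with _ | ⟨u, j⟩ <;> (try dsimp only)
      · rw [if_neg hr]; (try dsimp only)
      · rw [if_neg hr]
        by_cases hj : j > PySem.Str.rfind s t
        · rw [if_pos hj, if_pos hj]; (try dsimp only)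
        · rw [if_neg hj, if_neg hj]; (try dsimp only)

lemma pv_best_none_iff (s : String) (ts : List String) :
    pvBest s ts = none ↔ ∀ t ∈ ts, PySem.Str.rfind s t = -1 := by
  induction ts with
  | nil => simp [pvBest]
  | cons t ts ih =>
    rw [pvBest_cons, List.forall_mem_cons, ← ih]
    rcases hb : pvBest s ts with _ | ⟨u, j⟩ <;> dsimp only
    · by_cases hr : PySem.Str.rfind s t = -1
      · rw [if_pos hr]; rw [PySem.Str.rfind_eq] at hr; simp [hr]
      · rw [if_neg hr]; rw [PySem.Str.rfind_eq] at hr; simp [hr]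
    · by_cases hr : PySem.Str.rfind s t = -1
      · rw [if_pos hr]; rw [PySem.Str.rfind_eq] at hr; simp [hr]
      · rw [if_neg hr]
        by_cases hj : j > PySem.Str.rfind s t
        · rw [if_pos hj]; rw [PySem.Str.rfind_eq] at hr; simp [hr]
        · rw [if_neg hj]; rw [PySem.Str.rfind_eq] at hr; simp [hr]

lemma pv_best_some (s : String) (ts : List String) (u : String) (j : Int)
    (h : pvBest s ts = some (u, j)) :
    ts.find? (fun t => PySem.Str.rfind s t == j) = some u ∧
    (∀ t ∈ ts, PySem.Str.rfind s t ≤ j) ∧ 0 ≤ j := by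
  induction ts generalizing u j with
  | nil => simp [pvBest] at h
  | cons t ts ih =>
    rw [pvBest_cons] at h
    have hneg1 : (-1 : Int) ≤ PySem.Str.rfind s t := by
      rcases pv_rfind_cases s.toList t.toList with ⟨h1, _⟩ | ⟨i, _, h1, _, _⟩ <;>
        rw [PySem.Str.rfind_eq, h1] <;> omega
    rcases hb : pvBest s ts with _ | ⟨u', j'⟩ <;> rw [hb] at h <;> (try dsimp only at h)
    · by_cases hr : PySem.Str.rfind s t = -1
      · rw [if_pos hr] at h; exact absurd h (by simp)
      · rw [if_neg hr] at h
        simp only [Option.some.injEq, Prod.mk.injEq] at h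
        obtain ⟨rfl, rfl⟩ := h
        have hrest := (pv_best_none_iff s ts).mp hb
        refine ⟨by rw [List.find?_cons_of_pos (by simp)], ?_, by omega⟩
        intro t' ht'
        rcases List.mem_cons.mp ht' with rfl | ht'
        · exact le_refl _
        · rw [hrest t' ht']; omega
    · obtain ⟨hf', hle', hj'⟩ := ih u' j' hb
      by_cases hr : PySem.Str.rfind s t = -1
      · rw [if_pos hr] at h
        simp only [Option.some.injEq, Prod.mk.injEq] at h
        obtain ⟨rfl, rfl⟩ := h
        refine ⟨?_, ?_, hj'⟩
        · rw [List.find?_cons_of_neg (by rw [PySem.Str.rfind_eq] at hr; simp [hr]; omega), hf']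
        · intro t' ht'
          rcases List.mem_cons.mp ht' with rfl | ht'
          · rw [hr]; omega
          · exact hle' t' ht'
      · rw [if_neg hr] at h
        by_cases hj : j' > PySem.Str.rfind s t
        · rw [if_pos hj] at h
          simp only [Option.some.injEq, Prod.mk.injEq] at h
          obtain ⟨rfl, rfl⟩ := h
          refine ⟨?_, ?_, hj'⟩
          · rw [List.find?_cons_of_neg (by rw [PySem.Str.rfind_eq] at hj; simp; omega), hf']
          · intro t' ht'
            rcases List.mem_cons.mp ht' with rfl | ht'
            · omega
            · exact hle' t' ht'
        · rw [if_neg hj] at h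
          simp only [Option.some.injEq, Prod.mk.injEq] at h
          obtain ⟨rfl, rfl⟩ := h
          refine ⟨by rw [List.find?_cons_of_pos (by simp)], ?_, by omega⟩
          intro t' ht'
          rcases List.mem_cons.mp ht' with rfl | ht'
          · exact le_refl _
          · exact le_trans (hle' t' ht') (by omega)

lemma pv_find?_congr {α : Type} (p q : α → Bool) (l : List α)
    (h : ∀ x ∈ l, p x = q x) : l.find? p = l.find? q := by
  induction l with
  | nil => rfl
  | cons x l ih =>
    rcases hp : p x with _ | _
    · rw [List.find?_cons_of_neg (by simp [hp]), List.find?_cons_of_neg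
        (by rw [← h x (List.mem_cons_self)]; simp [hp]),
        ih (fun y hy => h y (List.mem_cons_of_mem _ hy))]
    · rw [List.find?_cons_of_pos hp, List.find?_cons_of_pos (by rw [← h x List.mem_cons_self]; exact hp)]

-- the guard-free scan (proof-side reference; pvScanB equals it when all tags start with '<')
def pvScanAll (s : String) (tags : List String) : Nat → Option (String × Nat)
  | 0 => none
  | i + 1 =>
    match tags.find? (fun t => t.toList.isPrefixOf (s.toList.drop i)) with
    | some t => some (t, i)
    | none => pvScanAll s tags i

lemma pv_scanB_eq_scanAll (s : String) (tags : List String)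
    (hlt : ∀ t ∈ tags, ∃ r, t.toList = '<' :: r) :
    ∀ n : Nat, pvScanB s tags n = pvScanAll s tags n := by
  intro n
  induction n with
  | zero => rfl
  | succ i ih =>
    rw [pvScanB, pvScanAll]
    by_cases hc : PySem.Str.pyGet? s (i : Int) = some '<'
    · rw [if_neg (by simpa using hc)]
      rcases hf : tags.find? (fun t => t.toList.isPrefixOf (s.toList.drop i)) with _ | t <;>
        rw [hf] <;> dsimp only
      exact ih
    · rw [if_pos (by simpa using hc), ih]
      rcases hf : tags.find? (fun t => t.toList.isPrefixOf (s.toList.drop i)) with _ | t <;>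
        rw [hf] <;> dsimp only
      exfalso
      have ht : t ∈ tags := List.mem_of_find?_eq_some hf
      have hpre : t.toList.isPrefixOf (s.toList.drop i) = true := by
        have := List.find?_some hf; simpa using this
      obtain ⟨r, hr⟩ := hlt t ht
      rw [hr] at hpre
      have hpre' := List.isPrefixOf_iff_prefix.mp hpre
      have hhead : (s.toList.drop i).head? = some '<' := by
        rcases hpre' with ⟨u, hu⟩
        rw [← hu]; rfl
      rw [List.head?_drop] at hhead
      rw [PySem.Str.pyGet?_natCast] at hc
      exact hc hhead

lemma pv_scan_none_iff (s : String) (tags : List String) (n : Nat) :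
    pvScanAll s tags n = none ↔
      ∀ i < n, tags.find? (fun t => t.toList.isPrefixOf (s.toList.drop i)) = none := by
  induction n with
  | zero => simp [pvScanAll]
  | succ n ih =>
    rw [pvScanAll]
    rcases hf : tags.find? (fun t => t.toList.isPrefixOf (s.toList.drop n)) with _ | t
    · rw [hf]; dsimp only
      rw [ih]
      constructor
      · intro h i hi
        rcases Nat.lt_or_ge i n with hlt | hge
        · exact h i hlt
        · have : i = n := by omega
          subst this; exact hf
      · intro h i hi; exact h i (by omega)
    · rw [hf]; dsimp only
      constructor
      · intro h; exact absurd h (by simp)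
      · intro h; rw [h n (by omega)] at hf; exact absurd hf (by simp)

lemma pv_scan_some (s : String) (tags : List String) (n : Nat) (t : String) (i : Nat)
    (h : pvScanAll s tags n = some (t, i)) :
    i < n ∧ tags.find? (fun u => u.toList.isPrefixOf (s.toList.drop i)) = some t ∧
      ∀ j, i < j → j < n → tags.find? (fun u => u.toList.isPrefixOf (s.toList.drop j)) = none := by
  induction n with
  | zero => simp [pvScanAll] at h
  | succ n ih =>
    rw [pvScanAll] at h
    rcases hf : tags.find? (fun u => u.toList.isPrefixOf (s.toList.drop n)) with _ | t'
    · rw [hf] at h; (try dsimp only at h)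
      obtain ⟨hlt, hfi, hmax⟩ := ih h
      refine ⟨by omega, hfi, ?_⟩
      intro j hj hj'
      rcases Nat.lt_or_ge j n with hlt' | hge
      · exact hmax j hj hlt'
      · have : j = n := by omega
        subst this; exact hf
    · rw [hf] at h; (try dsimp only at h)
      simp only [Option.some.injEq, Prod.mk.injEq] at h
      obtain ⟨rfl, rfl⟩ := h
      exact ⟨by omega, hf, by omega⟩

-- a tag matching at position |s| must be empty
lemma pv_prefix_at_len (s t : List Char) (h : t.isPrefixOf (List.drop s.length s) = true) :
    t = [] := by
  rw [List.drop_length] at h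
  exact List.prefix_nil.mp (List.isPrefixOf_iff_prefix.mp h)

-- A's argmax over per-tag rfind = B's single backward scan
lemma pv_fold_scan (s : String) (tags : List String) (hne : ∀ t ∈ tags, t.toList ≠ []) :
    tags.foldl (pvStepA s) (none, none) =
      match pvScanAll s tags s.toList.length with
      | none => (none, none)
      | some (t, i) => (some t, some (i : Int)) := by
  rw [pv_foldl_eq_best]
  rcases hsc : pvScanAll s tags s.toList.length with _ | ⟨t, i⟩ <;>
    rcases hbb : pvBest s tags with _ | ⟨u, j⟩
  · rfl
  · -- scan found nothing, best found something: impossible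
    exfalso
    obtain ⟨hfA, _, hj0⟩ := pv_best_some s tags u j hbb
    have hu : u ∈ tags := List.mem_of_find?_eq_some hfA
    have hru : PySem.Str.rfind s u = j := by
      have := List.find?_some hfA; simpa using this
    rcases pv_rfind_cases s.toList u.toList with ⟨h1, _⟩ | ⟨p, hple, hp, hpre, _⟩
    · rw [PySem.Str.rfind_eq, h1] at hru; omega
    · have hplen : p < s.toList.length := by
        rcases Nat.lt_or_ge p s.toList.length with h' | h'
        · exact h'
        · have : p = s.toList.length := by omega
          subst this
          exact absurd (pv_prefix_at_len _ _ hpre) (hne u hu)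
      have := (pv_scan_none_iff s tags s.toList.length).mp hsc p hplen
      rw [List.find?_eq_none] at this
      exact this u hu hpre
  · -- best found nothing, scan found something: impossible
    exfalso
    obtain ⟨hlt, hfi, _⟩ := pv_scan_some s tags s.toList.length t i hsc
    have ht : t ∈ tags := List.mem_of_find?_eq_some hfi
    have hpre : t.toList.isPrefixOf (s.toList.drop i) = true := by
      have := List.find?_some hfi; simpa using this
    have hrt := (pv_best_none_iff s tags).mp hbb t ht
    rw [PySem.Str.rfind_eq, pv_rfind_neg_iff] at hrt
    exact hrt i (by omega) hpre
  · -- both found: same tag, same position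
    obtain ⟨hfA, hle, hj0⟩ := pv_best_some s tags u j hbb
    obtain ⟨hlt, hfi, hmax⟩ := pv_scan_some s tags s.toList.length t i hsc
    have hu : u ∈ tags := List.mem_of_find?_eq_some hfA
    have hru : PySem.Str.rfind s u = j := by
      have := List.find?_some hfA; simpa using this
    have ht : t ∈ tags := List.mem_of_find?_eq_some hfi
    have hpre : t.toList.isPrefixOf (s.toList.drop i) = true := by
      have := List.find?_some hfi; simpa using this
    -- j = i
    have hji : j = (i : Int) := by
      rcases pv_rfind_cases s.toList u.toList with ⟨h1, _⟩ | ⟨p, hple, hp, hpreu, _⟩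
      · rw [PySem.Str.rfind_eq, h1] at hru; omega
      · rw [PySem.Str.rfind_eq, hp] at hru
        have hplen : p < s.toList.length := by
          rcases Nat.lt_or_ge p s.toList.length with h' | h'
          · exact h'
          · have : p = s.toList.length := by omega
            subst this
            exact absurd (pv_prefix_at_len _ _ hpreu) (hne u hu)
        have hpi : p ≤ i := by
          by_contra hc
          have := hmax p (by omega) hplen
          rw [List.find?_eq_none] at this
          exact this u hu hpreu
        have hit : (i : Int) ≤ PySem.Str.rfind s t := by
          rw [PySem.Str.rfind_eq]
          exact pv_rfind_ge s.toList t.toList i (by omega) hpre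
        have := hle t ht
        omega
    subst hji
    -- u = t
    have hcongr : tags.find? (fun x => PySem.Str.rfind s x == (i : Int)) =
        tags.find? (fun x => x.toList.isPrefixOf (s.toList.drop i)) := by
      apply pv_find?_congr
      intro x hx
      rcases hp : (x.toList.isPrefixOf (s.toList.drop i) : Bool) with _ | _
      · simp only [beq_eq_false_iff_ne, ne_eq]
        intro hrx
        rcases pv_rfind_cases s.toList x.toList with ⟨h1, _⟩ | ⟨p, hple, hp', hprex, _⟩
        · rw [PySem.Str.rfind_eq, h1] at hrx; omega
        · rw [PySem.Str.rfind_eq, hp'] at hrx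
          have : p = i := by omega
          subst this
          rw [hprex] at hp; exact absurd hp (by simp)
      · have hge : (i : Int) ≤ PySem.Str.rfind s x := by
          rw [PySem.Str.rfind_eq]
          exact pv_rfind_ge s.toList x.toList i (by omega) hp
        have := hle x hx
        simp only [beq_iff_eq]
        omega
    rw [hcongr, hfi] at hfA
    simp only [Option.some.injEq] at hfA
    subst hfA
    rfl

lemma pv_foldl_concat {α β : Type} (g : α → β) (L : List α) : ∀ acc : List β,
    L.foldl (fun a x => a ++ [g x]) acc = acc ++ L.map g := by
  induction L with
  | nil => intro acc; simp
  | cons x L ih => intro acc; simp [ih]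

-- A's flattened prefix list, re-expressed as a flatMap
lemma pv_process_list_eq (ets : List String) : ∀ acc : List String,
    ets.foldl (fun acc tag =>
        (List.range tag.toList.length).foldl
          (fun acc2 i => acc2 ++ [PySem.Str.slice tag none (some ((i : Int) + 1))]) acc) acc =
      acc ++ ets.flatMap (fun e =>
        (List.range e.toList.length).map (fun i => PySem.Str.slice e none (some ((i : Int) + 1)))) := by
  induction ets with
  | nil => intro acc; simp
  | cons e ets ih =>
    intro acc
    rw [List.foldl_cons, pv_foldl_concat, ih, List.flatMap_cons, List.append_assoc]

lemma pv_any_eq (s : String) (ets : List String) :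
    (ets.foldl (fun acc tag =>
        (List.range tag.toList.length).foldl
          (fun acc2 i => acc2 ++ [PySem.Str.slice tag none (some ((i : Int) + 1))]) acc)
      ([] : List String)).any (fun p => PySem.Str.endswith s p) =
    ets.any (fun e => (List.range e.toList.length).any
      (fun k => PySem.Str.endswith s (PySem.Str.slice e none (some ((k : Int) + 1))))) := by
  rw [pv_process_list_eq, List.nil_append, List.any_flatMap]
  simp [List.any_map]

-- ===== VERDICT (by name: the statement is the Claim_ definition above) =====
theorem judge_delta_content_type_py_spec : Claim_equal_judge_delta_content_type_py := by
  intro delta_content all_tokens_str tag_type _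
  unfold Spec_judge_delta_content_type_py
  unfold judge_delta_content_type_py judge_delta_content_type_py_alt
  dsimp only
  set tagType := tag_type.getD [] with htt
  set start_tag := tagType.map (fun tag => "<" ++ tag ++ ">") with hst
  set end_tag := tagType.map (fun tag => "</" ++ tag ++ ">") with het
  set s := PySem.Str.strip (all_tokens_str ++ delta_content) with hs
  have hne : ∀ t ∈ start_tag ++ end_tag, t.toList ≠ [] := by
    intro t ht
    rcases List.mem_append.mp ht with h | h <;>
      obtain ⟨x, _, rfl⟩ := List.mem_map.mp h <;>
      simp [String.toList_append]
  have hlt : ∀ t ∈ start_tag ++ end_tag, ∃ r, t.toList = '<' :: r := by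
    intro t ht
    rcases List.mem_append.mp ht with h | h <;> obtain ⟨x, _, rfl⟩ := List.mem_map.mp h
    · exact ⟨x.toList ++ ['>'], by simp [String.toList_append]⟩
    · exact ⟨'/' :: x.toList ++ ['>'], by simp [String.toList_append]⟩
  by_cases hE : (start_tag ++ end_tag).isEmpty = true
  · rw [List.isEmpty_iff.mp hE]
    rfl
  · rw [if_neg hE, pv_fold_scan s (start_tag ++ end_tag) hne, pv_scanB_eq_scanAll s _ hlt]
    rcases pvScanAll s (start_tag ++ end_tag) s.toList.length with _ | ⟨t, i⟩
    · rfl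
    · dsimp only
      by_cases hmem : t ∈ start_tag
      · rw [if_pos hmem, if_pos hmem]
        have hlen : ((i : Int) + PySem.Str.len t = PySem.Str.len s) ↔
            (i + t.toList.length = s.toList.length) := by
          rw [PySem.Str.len_eq, PySem.Str.len_eq]; omega
        by_cases hc : i + t.toList.length = s.toList.length
        · rw [if_pos (hlen.mpr hc), if_pos hc]
        · rw [if_neg (fun h => hc (hlen.mp h)), if_neg hc, pv_any_eq]
      · rw [if_neg hmem, if_neg hmem, ite_self]
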